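-- pv_equiv track=rewrite | github.com/MatthewHq/leetcode | zz Non-LeetCode/HackerRank/Crossword Puzzle/Sol copy 2.py | getWordsBySize
-- ===== SOURCE A (Python) =====
-- def getWordsBySize(words):
--     bySize={}
--     for i in range(len(words)):
--         word=words[i]
--         if bySize.get(len(word))==None:
--             bySize[len(word)]=[i]
--         else:
--             bySize[len(word)].append(i)
--     return bySize
-- ===== SOURCE B (Python) =====
-- def getWordsBySize(words):
--     lengths = [len(w) for w in words]
--     seen = []
--     for L in lengths:
--         if L not in seen:
--             seen.append(L)
--     return {L: [i for i, x in enumerate(lengths) if x == L] for L in seen}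
-- ===== Notes on version B (the rewrite author's own statement) =====
-- stated objective: alternative
-- what changed: Replaces the one-pass dict bucket accumulation by a two-phase scheme: first dedup the word lengths in first-occurrence order, then build each group with a per-length comprehension over the enumerated lengths.
import Mathlib
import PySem

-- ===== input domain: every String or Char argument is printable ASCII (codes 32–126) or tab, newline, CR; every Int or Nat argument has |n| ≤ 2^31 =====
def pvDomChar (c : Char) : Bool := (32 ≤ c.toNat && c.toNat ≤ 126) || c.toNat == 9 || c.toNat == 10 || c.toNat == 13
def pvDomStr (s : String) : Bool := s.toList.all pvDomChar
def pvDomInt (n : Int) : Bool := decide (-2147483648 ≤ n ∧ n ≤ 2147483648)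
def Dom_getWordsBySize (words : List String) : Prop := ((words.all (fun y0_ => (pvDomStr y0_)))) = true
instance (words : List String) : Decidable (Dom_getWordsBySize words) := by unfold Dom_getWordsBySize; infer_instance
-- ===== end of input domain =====

-- B groups word indices by length via an ordered dedup of the lengths plus a per-length
-- comprehension, instead of A's one-pass dict bucket accumulation; same cost class, alternative structure.

-- ===== PORT A =====
def getWordsBySize (words : List String) : List (Int × List Int) :=
  let bySize : PySem.Dict Int (List Int) :=
    (PySem.List.pyRange 0 (words.length : Int) 1).foldl
      (fun bySize i =>
        let word := PySem.List.pyGetD words i ""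
        if bySize.get? (PySem.Str.len word) = none then
          bySize.insert (PySem.Str.len word) [i]
        else
          bySize.modify (PySem.Str.len word) [] (fun l => l ++ [i]))
      PySem.Dict.empty
  bySize.items

-- ===== PORT B =====
def getWordsBySize_alt (words : List String) : List (Int × List Int) :=
  let lengths : List Int := words.map (fun w => PySem.Str.len w)
  let seen : List Int := lengths.foldl (fun s L => if L ∈ s then s else s ++ [L]) []
  seen.map (fun L =>
    (L, (PySem.List.enumerate lengths 0).filterMap
          (fun p => if p.2 = L then some p.1 else none)))

-- ===== PRECONDITION & SPEC =====
def Spec_getWordsBySize (words : List String) (out : List (Int × List Int)) : Prop := out = getWordsBySize_alt words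
instance (words : List String) (out : List (Int × List Int)) : Decidable (Spec_getWordsBySize words out) := by unfold Spec_getWordsBySize; infer_instance

-- ===== CLAIM (what is proved, stated in full; the proofs are below) =====
def Claim_equal_getWordsBySize : Prop := ∀ (words : List String), Dom_getWordsBySize words → Spec_getWordsBySize words (getWordsBySize words)

-- ===== LEMMAS AND PROOFS =====

-- A's fold step, expressed on (index, length) pairs
def pvStep (d : PySem.Dict Int (List Int)) (p : Int × Int) : PySem.Dict Int (List Int) :=
  if d.get? p.2 = none then d.insert p.2 [p.1] else d.modify p.2 [] (fun l => l ++ [p.1])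

-- B's dedup step
def pvSeenStep (s : List Int) (L : Int) : List Int := if L ∈ s then s else s ++ [L]

theorem pv_mem_foldl_seen (ls : List Int) (init : List Int) (x : Int) :
    x ∈ ls.foldl pvSeenStep init ↔ x ∈ init ∨ x ∈ ls := by
  induction ls generalizing init with
  | nil => simp
  | cons a t ih =>
    simp only [List.foldl_cons, ih, pvSeenStep]
    split_ifs with h
    · constructor
      · rintro (h1 | h1)
        · exact Or.inl h1
        · exact Or.inr (List.mem_cons_of_mem _ h1)
      · rintro (h1 | h1)
        · exact Or.inl h1
        · rcases List.mem_cons.mp h1 with rfl | h1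
          · exact Or.inl h
          · exact Or.inr h1
    · simp only [List.mem_append, List.mem_cons]
      tauto

theorem pv_enumerate_map {α β : Type} (f : α → β) (xs : List α) (s : Int) :
    PySem.List.enumerate (xs.map f) s = (PySem.List.enumerate xs s).map (fun p => (p.1, f p.2)) := by
  induction xs generalizing s with
  | nil => simp [PySem.List.enumerate]
  | cons a t ih => simp [PySem.List.enumerate, ih]

theorem pv_main (ls : List Int) (s : Int) :
    ((PySem.List.enumerate ls s).foldl pvStep PySem.Dict.empty).items
      = (ls.foldl pvSeenStep []).map (fun L =>
          (L, (PySem.List.enumerate ls s).filterMap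
                (fun p => if p.2 = L then some p.1 else none))) := by
  induction ls using List.reverseRecOn with
  | nil => simp [PySem.List.enumerate, PySem.Dict.empty]
  | append_singleton t L ih =>
    rw [PySem.List.enumerate_append, List.foldl_append, List.foldl_append]
    simp only [PySem.List.enumerate, List.foldl_cons, List.foldl_nil, List.filterMap_append]
    have hmem : ∀ x : Int, x ∈ t.foldl pvSeenStep [] ↔ x ∈ t := by
      intro x; rw [pv_mem_foldl_seen]; simp
    have hfind : (t.foldl pvSeenStep []).find? (fun c => c == L)
        = if L ∈ t.foldl pvSeenStep [] then some L else none := by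
      split_ifs with h
      · obtain ⟨a, ha⟩ : ∃ a, (t.foldl pvSeenStep []).find? (fun c => c == L) = some a :=
          Option.isSome_iff_exists.mp
            (List.find?_isSome.mpr ⟨L, h, beq_self_eq_true L⟩)
        have hb := List.find?_some ha
        rw [ha, eq_of_beq hb]
      · exact List.find?_eq_none.mpr (fun x hx hb => h (by rwa [eq_of_beq hb] at hx))
    have hget : (List.foldl pvStep PySem.Dict.empty (PySem.List.enumerate t s)).get? L
        = if L ∈ t.foldl pvSeenStep [] then
            some ((PySem.List.enumerate t s).filterMap (fun p => if p.2 = L then some p.1 else none))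
          else none := by
      rw [PySem.Dict.get?]
      have : (List.foldl pvStep PySem.Dict.empty (PySem.List.enumerate t s)).items.find?
          (fun p => p.1 == L)
          = ((t.foldl pvSeenStep []).find? (fun c => c == L)).map
              (fun c => (c, (PySem.List.enumerate t s).filterMap (fun p => if p.2 = c then some p.1 else none))) := by
        rw [ih, List.find?_map]; rfl
      rw [this, hfind]
      split_ifs <;> simp
    have hcont : (List.foldl pvStep PySem.Dict.empty (PySem.List.enumerate t s)).contains L
        = decide (L ∈ t.foldl pvSeenStep []) := by
      by_cases h : L ∈ t.foldl pvSeenStep []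
      · simp only [h, decide_true]
        by_contra hc
        have : (List.foldl pvStep PySem.Dict.empty (PySem.List.enumerate t s)).get? L = none :=
          (PySem.Dict.get?_eq_none_iff_contains _ _).mpr (by simpa using hc)
        rw [hget, if_pos h] at this
        exact Option.some_ne_none _ this
      · simp only [h, decide_false]
        have hn : (List.foldl pvStep PySem.Dict.empty (PySem.List.enumerate t s)).get? L = none := by
          rw [hget, if_neg h]
        exact (PySem.Dict.get?_eq_none_iff_contains _ _).mp hn
    by_cases h : L ∈ t.foldl pvSeenStep []
    · -- existing key: A modifies in place, B's seen is unchanged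
      rw [pvSeenStep, if_pos h, pvStep]
      simp only [hget, if_pos h, reduceCtorEq, if_false]
      rw [PySem.Dict.modify, PySem.Dict.getD, hget, if_pos h, PySem.Dict.insert,
        hcont, decide_eq_true h, if_pos rfl, ih]
      show List.map _ (List.map _ _) = _
      rw [List.map_map]
      refine List.map_congr_left (fun c hc => ?_)
      by_cases hcL : c = L
      · subst hcL; simp
      · simp [Function.comp, hcL, Ne.symm hcL]
    · -- new key: A appends a fresh bucket, B's seen grows by L
      have hLt : L ∉ t := fun hh => h ((hmem L).mpr hh)
      have hgrpL : (PySem.List.enumerate t s).filterMap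
          (fun p => if p.2 = L then some p.1 else none) = [] := by
        refine List.filterMap_eq_nil_iff.mpr (fun p hp => ?_)
        have hp2 : p.2 ∈ t := by
          rw [← PySem.List.map_snd_enumerate t s]; exact List.mem_map_of_mem hp
        have : p.2 ≠ L := fun e => hLt (e ▸ hp2)
        simp [this]
      rw [pvSeenStep, if_neg h, pvStep, hget, if_neg h, if_pos rfl,
        PySem.Dict.insert, hcont, decide_eq_false h, if_neg Bool.false_ne_true]
      show (List.foldl pvStep PySem.Dict.empty (PySem.List.enumerate t s)).items
          ++ [(L, [s + (t.length : Int)])] = _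
      rw [List.map_append, ih]
      congr 1
      · refine List.map_congr_left (fun c hc => ?_)
        have hne : ¬ (L = c) := fun e => h (e ▸ hc)
        simp [hne]
      · simp [hgrpL]


theorem getWordsBySize_eq (words : List String) :
    getWordsBySize words = getWordsBySize_alt words := by
  unfold getWordsBySize getWordsBySize_alt
  have h1 : PySem.List.enumerate words 0
      = (PySem.List.pyRange 0 (words.length : Int) 1).map
          (fun j => (j, PySem.List.pyGetD words j "")) :=
    PySem.List.enumerate_eq_map_pyRange words ""
  have h2 := pv_main (words.map (fun w => PySem.Str.len w)) 0
  rw [pv_enumerate_map, h1, List.foldl_map, List.map_map] at h2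
  simpa [pvStep, pvSeenStep, Function.comp, List.foldl_map, List.map_map, pv_enumerate_map, h1, List.filterMap_map] using h2

-- ===== VERDICT (by name: the statement is the Claim_ definition above) =====
theorem getWordsBySize_spec : Claim_equal_getWordsBySize := by
  intro words _
  unfold Spec_getWordsBySize
  exact getWordsBySize_eq words
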